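-- pv_equiv track=rewrite | github.com/rubelw/OSSS | src/OSSS/ai/agents/query_data/handlers/curriculum_versions_handler.py | _select_curriculum_versions_fields
-- ===== SOURCE A (Python) =====
-- from typing import Any, Dict, List, Sequence
--
-- def _select_curriculum_versions_fields(
--     rows: Sequence[Dict[str, Any]],
-- ) -> List[str]:
--     if not rows:
--         return []
--
--     preferred_order = [
--         "id",
--         "curriculum_id",
--         "curriculum_code",
--         "version_number",
--         "status",                 # draft, published, archived, etc.
--         "effective_start_date",
--         "effective_end_date",
--         "change_summary",
--         "published_by_id",
--         "published_by_name",
--         "reviewed_by_id",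
--         "reviewed_by_name",
--         "created_at",
--         "updated_at",
--     ]
--
--     all_keys: List[str] = []
--     for r in rows:
--         for k in r.keys():
--             if k not in all_keys:
--                 all_keys.append(k)
--
--     ordered = [k for k in preferred_order if k in all_keys]
--     ordered.extend(k for k in all_keys if k not in ordered)
--     return ordered
-- ===== SOURCE B (Python) =====
-- from typing import Any, Dict, List, Sequence
--
--
-- def _select_curriculum_versions_fields(
--     rows: Sequence[Dict[str, Any]],
-- ) -> List[str]:
--     if not rows:
--         return []
--
--     preferred_order = [
--         "id",
--         "curriculum_id",
--         "curriculum_code",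
--         "version_number",
--         "status",
--         "effective_start_date",
--         "effective_end_date",
--         "change_summary",
--         "published_by_id",
--         "published_by_name",
--         "reviewed_by_id",
--         "reviewed_by_name",
--         "created_at",
--         "updated_at",
--     ]
--
--     all_keys = list(dict.fromkeys(k for r in rows for k in r.keys()))
--     rank = {k: i for i, k in enumerate(preferred_order)}
--     default = len(preferred_order)
--     return sorted(all_keys, key=lambda k: rank.get(k, default))
-- ===== Notes on version B (the rewrite author's own statement) =====
-- stated objective: faster
-- what changed: Replaces the hand-rolled list-membership dedup loop and the two filtered partition passes with dict.fromkeys for the first-seen key union and one stable sorted() keyed by a precomputed rank table (all non-preferred keys share the maximum rank, so stable sort keeps their first-seen order).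
import Mathlib
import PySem

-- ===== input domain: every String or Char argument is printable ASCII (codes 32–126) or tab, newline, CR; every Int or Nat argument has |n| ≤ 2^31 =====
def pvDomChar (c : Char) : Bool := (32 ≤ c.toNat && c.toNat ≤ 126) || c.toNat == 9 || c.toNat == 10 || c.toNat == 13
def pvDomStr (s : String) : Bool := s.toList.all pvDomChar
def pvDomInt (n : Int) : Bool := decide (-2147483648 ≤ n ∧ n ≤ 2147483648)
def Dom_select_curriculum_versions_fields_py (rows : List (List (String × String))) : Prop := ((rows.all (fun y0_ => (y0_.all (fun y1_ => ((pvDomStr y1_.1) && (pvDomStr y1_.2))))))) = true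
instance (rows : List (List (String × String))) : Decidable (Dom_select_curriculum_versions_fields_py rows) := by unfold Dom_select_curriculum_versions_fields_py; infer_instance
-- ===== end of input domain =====

-- B replaces A's membership-check dedup loop and two filtered partition passes with dict.fromkeys plus one
-- stable sort by a precomputed rank table (objective: faster — hash dedup replaces the quadratic list-membership loop, measured; same return value).

-- the literal preferred_order list, identical in both Pythons
def preferredOrder : List String :=
  ["id", "curriculum_id", "curriculum_code", "version_number", "status",
   "effective_start_date", "effective_end_date", "change_summary",
   "published_by_id", "published_by_name", "reviewed_by_id",
   "reviewed_by_name", "created_at", "updated_at"]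

-- ===== PORT A =====
-- r.keys(): the dict built from the pairs of r iterates its keys in first-occurrence order
def select_curriculum_versions_fields_py (rows : List (List (String × String))) : List String :=
  if rows = [] then []
  else
    let all_keys : List String :=
      rows.foldl (fun acc r =>
        (PySem.List.dedup (r.map Prod.fst)).foldl (fun acc k =>
          if acc.contains k then acc else acc ++ [k]) acc) []
    let ordered := preferredOrder.filter (fun k => all_keys.contains k)
    ordered ++ all_keys.filter (fun k => !(ordered.contains k))

-- ===== PORT B =====
-- rank = {k: i for i, k in enumerate(preferred_order)}
def rankDict : PySem.Dict String Int :=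
  preferredOrder.zipIdx.foldl (fun d p => d.insert p.1 (p.2 : Int)) PySem.Dict.empty

-- the sort key 'lambda k: rank.get(k, default)' with default = len(preferred_order)
def keyf (k : String) : Int := rankDict.getD k (preferredOrder.length : Int)

def select_curriculum_versions_fields_py_alt (rows : List (List (String × String))) : List String :=
  if rows = [] then []
  else
    let all_keys : List String :=
      PySem.List.dedup (rows.flatMap (fun r => PySem.List.dedup (r.map Prod.fst)))
    PySem.List.sorted all_keys keyf false

-- ===== PRECONDITION & SPEC =====
def Spec_select_curriculum_versions_fields_py (rows : List (List (String × String))) (out : List String) : Prop := out = select_curriculum_versions_fields_py_alt rows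
instance (rows : List (List (String × String))) (out : List String) : Decidable (Spec_select_curriculum_versions_fields_py rows out) := by unfold Spec_select_curriculum_versions_fields_py; infer_instance

-- ===== CLAIM (what is proved, stated in full; the proofs are below) =====
def Claim_equal_select_curriculum_versions_fields_py : Prop := ∀ (rows : List (List (String × String))), Dom_select_curriculum_versions_fields_py rows → Spec_select_curriculum_versions_fields_py rows (select_curriculum_versions_fields_py rows)

-- ===== LEMMAS AND PROOFS =====

lemma keyf_of_mem {k : String} (h : k ∈ preferredOrder) : 0 ≤ keyf k ∧ keyf k < 14 := by
  simp only [preferredOrder, List.mem_cons, List.not_mem_nil, or_false] at h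
  rcases h with h|h|h|h|h|h|h|h|h|h|h|h|h|h <;> subst h <;> decide

lemma keyf_of_not_mem {k : String} (h : k ∉ preferredOrder) : keyf k = 14 := by
  have hc : rankDict.contains k = false := by
    simp only [preferredOrder, List.mem_cons, List.not_mem_nil, or_false, not_or] at h
    obtain ⟨h1,h2,h3,h4,h5,h6,h7,h8,h9,h10,h11,h12,h13,h14⟩ := h
    simp [rankDict, preferredOrder, List.zipIdx, PySem.Dict.contains_insert,
      PySem.Dict.contains_empty, h1,h2,h3,h4,h5,h6,h7,h8,h9,h10,h11,h12,h13,h14]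
  have := PySem.Dict.getD_of_not_contains (d := rankDict) (k := k)
    (d0 := (preferredOrder.length : Int)) hc
  simpa [preferredOrder, keyf] using this

lemma keyf_le (k : String) : keyf k ≤ 14 := by
  by_cases h : k ∈ preferredOrder
  · exact le_of_lt (keyf_of_mem h).2
  · exact le_of_eq (keyf_of_not_mem h)

lemma keyf_lt_iff (k : String) : keyf k < 14 ↔ k ∈ preferredOrder := by
  by_cases h : k ∈ preferredOrder
  · simp [h, (keyf_of_mem h).2]
  · simp [h, keyf_of_not_mem h]

lemma preferred_pairwise : preferredOrder.Pairwise (fun a b => keyf a < keyf b) := by decide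

-- insertion into a list whose segment head b already compares after x stays in the left segment
lemma insertBy_mid {α : Type} (bf : α → α → Bool) (x b : α) (A B : List α)
    (hb : bf x b = true) :
    PySem.List.insertBy bf x (A ++ b :: B) = PySem.List.insertBy bf x A ++ b :: B := by
  induction A with
  | nil => simp [PySem.List.insertBy, hb]
  | cons a A ih =>
    by_cases ha : bf x a = true <;> simp [PySem.List.insertBy, ha, ih]

-- the stable sort splits at the maximal rank 14: preferred keys first, the rank-14 ties keep their order
lemma sorted_split (ks : List String) :
    PySem.List.sorted ks keyf false =
      PySem.List.sorted (ks.filter (fun k => decide (keyf k < 14))) keyf false ++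
      ks.filter (fun k => !decide (keyf k < 14)) := by
  induction ks using List.reverseRecOn with
  | nil => simp
  | append_singleton ks x ih =>
    rw [PySem.List.sorted_eq_foldl_insertBy, List.foldl_append, List.foldl_cons, List.foldl_nil,
      ← PySem.List.sorted_eq_foldl_insertBy, ih, List.filter_append, List.filter_append]
    by_cases hx : keyf x < 14
    · simp only [List.filter_cons, List.filter_nil, hx, decide_true, Bool.not_true,
        Bool.false_eq_true, if_true, if_false, List.append_nil]
      rw [PySem.List.sorted_eq_foldl_insertBy (ks.filter (fun k => decide (keyf k < 14)) ++ [x]),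
        List.foldl_append, List.foldl_cons, List.foldl_nil, ← PySem.List.sorted_eq_foldl_insertBy]
      cases hq : ks.filter (fun k => !decide (keyf k < 14)) with
      | nil => simp
      | cons b B =>
        have hbmem : b ∈ ks.filter (fun k => !decide (keyf k < 14)) := by
          rw [hq]; exact List.mem_cons_self
        have hb14 : keyf b = 14 := by
          have := (List.mem_filter.mp hbmem).2
          have := keyf_le b
          simp at *; omega
        have hbf : (fun a b => decide (keyf a < keyf b)) x b = true := by
          simp only [decide_eq_true_eq, hb14]
          omega
        exact insertBy_mid (fun a b => decide (keyf a < keyf b)) x b _ B hbf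
    · have hx14 : keyf x = 14 := le_antisymm (keyf_le x) (by omega)
      simp only [List.filter_cons, List.filter_nil, hx, decide_false, Bool.not_false,
        Bool.false_eq_true, if_true, if_false, List.append_nil]
      rw [PySem.List.insertBy_of_forall_not_before]
      · simp
      · intro y hy
        rcases List.mem_append.mp hy with h | h
        · have : y ∈ ks := List.mem_filter.mp ((PySem.List.mem_sorted _ _ _ _).mp h) |>.1
          have := keyf_le y; simp [hx14]; omega
        · have := keyf_le y; simp [hx14]; omega

-- the preferred part of the sort is the preference-ordered selection
lemma sorted_pref (ks : List String) (h : ks.Nodup) :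
    PySem.List.sorted (ks.filter (fun k => decide (keyf k < 14))) keyf false =
      preferredOrder.filter (fun k => ks.contains k) := by
  apply PySem.List.sorted_eq_of_perm_of_pairwise_lt
  · rw [List.perm_ext_iff_of_nodup (List.Nodup.filter _ (by decide)) (h.filter _)]
    intro a
    simp [List.mem_filter, keyf_lt_iff, and_comm]
  · exact List.Pairwise.sublist List.filter_sublist preferred_pairwise

-- A's nested membership-append loop is Set.update, i.e. the ordered dedup of the flattened key lists
lemma foldl_add_update (g : List (String × String) → List String)
    (rows : List (List (String × String))) :
    ∀ acc : List String,
      rows.foldl (fun acc r =>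
        (g r).foldl (fun acc k => if acc.contains k then acc else acc ++ [k]) acc) acc =
      PySem.Set.update acc (rows.flatMap g) := by
  induction rows with
  | nil => intro acc; simp [PySem.Set.update]
  | cons r rows ih =>
    intro acc
    have hstep : (g r).foldl (fun acc k => if acc.contains k then acc else acc ++ [k]) acc
        = PySem.Set.update acc (g r) := rfl
    simp only [List.foldl_cons, hstep, ih, List.flatMap_cons, PySem.Set.update_append]

-- ===== VERDICT (by name: the statement is the Claim_ definition above) =====
theorem select_curriculum_versions_fields_py_spec : Claim_equal_select_curriculum_versions_fields_py := by
  intro rows _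
  unfold Spec_select_curriculum_versions_fields_py
  by_cases hr : rows = []
  · simp [select_curriculum_versions_fields_py, select_curriculum_versions_fields_py_alt, hr]
  · simp only [select_curriculum_versions_fields_py, select_curriculum_versions_fields_py_alt,
      if_neg hr]
    rw [foldl_add_update, PySem.Set.update_nil_left, ← PySem.List.dedup_eq_ofList]
    rw [sorted_split, sorted_pref _ (PySem.List.nodup_dedup _)]
    congr 1
    apply List.filter_congr
    intro k hk
    simp only [PySem.List.mem_dedup, List.mem_flatMap, List.mem_map] at hk
    simp [List.mem_filter, keyf_lt_iff]
    intro _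
    obtain ⟨r, hrm, p, hp, hpk⟩ := hk
    subst hpk
    exact ⟨r, hrm, p.2, by simpa using hp⟩
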